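-- pv_equiv track=rewrite | github.com/owenguobadia24s-collab/ovc-infra | trajectory_families/fingerprint.py | get_dominant_quadrant
-- ===== SOURCE A (Python) =====
-- from typing import Any, Dict, List, Optional, Tuple
--
-- def get_dominant_quadrant(quadrants: List[Optional[str]]) -> Optional[str]:
--     """Get the most frequent quadrant (mode)."""
--     counts = {"Q1": 0, "Q2": 0, "Q3": 0, "Q4": 0}
--     for q in quadrants:
--         if q in counts:
--             counts[q] += 1
--
--     if max(counts.values()) == 0:
--         return None
--
--     # Return first max in sorted order for determinism
--     max_count = max(counts.values())
--     for q in ["Q1", "Q2", "Q3", "Q4"]: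
--         if counts[q] == max_count:
--             return q
--     return None
-- ===== SOURCE B (Python) =====
-- def get_dominant_quadrant(quadrants):
--     """Get the most frequent quadrant (mode) via sort-then-scan over runs."""
--     labels = sorted(q for q in quadrants if q in ("Q1", "Q2", "Q3", "Q4"))
--     best = None
--     best_len = 0
--     cur = None
--     cur_len = 0
--     for q in labels:
--         if q == cur:
--             cur_len += 1
--         else:
--             if cur_len > best_len:
--                 best, best_len = cur, cur_len
--             cur, cur_len = q, 1
--     if cur_len > best_len:
--         best = cur
--     return best
-- ===== Notes on version B (the rewrite author's own statement) =====
-- stated objective: alternative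
-- what changed: Replaced A's hash-table counting pass plus max/first-max scans with sort-then-scan: sort the recognized labels, then walk the sorted list once tracking run lengths, keeping the first run strictly longer than the best so far (sorted order makes that A's Q1..Q4 tie-break).
import Mathlib
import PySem

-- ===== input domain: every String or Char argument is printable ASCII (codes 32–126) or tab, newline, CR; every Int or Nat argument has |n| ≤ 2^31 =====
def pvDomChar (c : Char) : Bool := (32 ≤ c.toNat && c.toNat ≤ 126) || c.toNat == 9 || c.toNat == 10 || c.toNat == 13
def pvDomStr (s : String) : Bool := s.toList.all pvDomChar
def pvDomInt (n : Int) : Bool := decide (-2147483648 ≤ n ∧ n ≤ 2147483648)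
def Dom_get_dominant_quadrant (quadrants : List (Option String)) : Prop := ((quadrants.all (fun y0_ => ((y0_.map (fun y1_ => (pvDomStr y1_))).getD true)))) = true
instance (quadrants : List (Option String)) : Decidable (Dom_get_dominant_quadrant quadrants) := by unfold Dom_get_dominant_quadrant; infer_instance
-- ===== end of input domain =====

-- B replaces A's hash-table counting pass + max/first-max scans with sort-then-scan: sort the
-- recognized labels and walk the runs once, keeping the first strictly longest run (alternative algorithm).

-- ===== PORT A =====
def get_dominant_quadrant (quadrants : List (Option String)) : Option String :=
  let counts := quadrants.foldl
    (fun c q => match q with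
      | some s => if c.contains s then c.modify s 0 (· + 1) else c
      | none => c)  -- 'q in counts' is False for None (no None key), so None leaves counts unchanged
    (PySem.Dict.ofList [("Q1", (0:Int)), ("Q2", 0), ("Q3", 0), ("Q4", 0)])
  match PySem.List.max? counts.values (fun x => x) with
  | none => none   -- unreachable: counts always has four values, as in the Python
  | some m =>
    if m = 0 then none
    else ["Q1", "Q2", "Q3", "Q4"].find? (fun q => counts.getD q 0 == m)

-- ===== PORT B =====
-- B's loop body: state is (best, best_len, cur, cur_len)
def gdqStep (st : Option String × Int × Option String × Int) (q : String) :
    Option String × Int × Option String × Int :=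
  if some q = st.2.2.1 then (st.1, st.2.1, st.2.2.1, st.2.2.2 + 1)
  else if st.2.2.2 > st.2.1 then (st.2.2.1, st.2.2.2, some q, 1)
  else (st.1, st.2.1, some q, 1)

def get_dominant_quadrant_alt (quadrants : List (Option String)) : Option String :=
  let labels := PySem.List.sorted
    (quadrants.filterMap (fun q => match q with
      | some s => if s = "Q1" ∨ s = "Q2" ∨ s = "Q3" ∨ s = "Q4" then some s else none
      | none => none))
    (fun x => x) false
  let st := labels.foldl gdqStep (none, 0, none, 0)
  if st.2.2.2 > st.2.1 then st.2.2.1 else st.1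

-- ===== PRECONDITION & SPEC =====
def Spec_get_dominant_quadrant (quadrants : List (Option String)) (out : Option String) : Prop := out = get_dominant_quadrant_alt quadrants
instance (quadrants : List (Option String)) (out : Option String) : Decidable (Spec_get_dominant_quadrant quadrants out) := by unfold Spec_get_dominant_quadrant; infer_instance

-- ===== CLAIM (what is proved, stated in full; the proofs are below) =====
def Claim_equal_get_dominant_quadrant : Prop := ∀ (quadrants : List (Option String)), Dom_get_dominant_quadrant quadrants → Spec_get_dominant_quadrant quadrants (get_dominant_quadrant quadrants)

-- ===== LEMMAS AND PROOFS =====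

-- B's comprehension filter, named for the proofs
def gdqKeep (q : Option String) : Option String :=
  match q with
  | some s => if s = "Q1" ∨ s = "Q2" ∨ s = "Q3" ∨ s = "Q4" then some s else none
  | none => none

-- closing of the final run (B's trailing if), named for the proofs
def gdqFin (st : Option String × Int × Option String × Int) : Option String :=
  if st.2.2.2 > st.2.1 then st.2.2.1 else st.1

-- abstract running-best over (label, count) pairs: the common form both sides are reduced to
def gdqBest (b : Option String × Int) (p : String × Nat) : Option String × Int :=
  if (p.2 : Int) > b.2 then (some p.1, (p.2 : Int)) else b

lemma count_filterMap_keep (s : String) (hs : s = "Q1" ∨ s = "Q2" ∨ s = "Q3" ∨ s = "Q4")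
    (l : List (Option String)) : (l.filterMap gdqKeep).count s = l.count (some s) := by
  induction l with
  | nil => rfl
  | cons q t ih =>
    cases q with
    | none =>
      have hk : gdqKeep none = none := rfl
      simp only [List.filterMap_cons, hk, List.count_cons]
      simp [ih]
    | some u =>
      by_cases hu : u = "Q1" ∨ u = "Q2" ∨ u = "Q3" ∨ u = "Q4"
      · have hk : gdqKeep (some u) = some u := by simp [gdqKeep, hu]
        simp only [List.filterMap_cons, hk, List.count_cons, ih]
        simp
      · have hus : u ≠ s := by rintro rfl; exact hu hs
        have hk : gdqKeep (some u) = none := by simp [gdqKeep, hu]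
        simp only [List.filterMap_cons, hk, List.count_cons, ih]
        simp [hus]

lemma mem_filterMap_keep (l : List (Option String)) (x : String)
    (hx : x ∈ l.filterMap gdqKeep) : x = "Q1" ∨ x = "Q2" ∨ x = "Q3" ∨ x = "Q4" := by
  rw [List.mem_filterMap] at hx
  obtain ⟨q, _, hq⟩ := hx
  cases q with
  | none => simp [gdqKeep] at hq
  | some u =>
    by_cases hu : u = "Q1" ∨ u = "Q2" ∨ u = "Q3" ∨ u = "Q4"
    · simp [gdqKeep, hu] at hq; subst hq; exact hu
    · simp [gdqKeep, hu] at hq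

lemma qle12 : ("Q1":String) ≤ "Q2" := by rw [String.le_iff_toList_le]; decide
lemma qle13 : ("Q1":String) ≤ "Q3" := by rw [String.le_iff_toList_le]; decide
lemma qle14 : ("Q1":String) ≤ "Q4" := by rw [String.le_iff_toList_le]; decide
lemma qle23 : ("Q2":String) ≤ "Q3" := by rw [String.le_iff_toList_le]; decide
lemma qle24 : ("Q2":String) ≤ "Q4" := by rw [String.le_iff_toList_le]; decide
lemma qle34 : ("Q3":String) ≤ "Q4" := by rw [String.le_iff_toList_le]; decide

lemma blocks_pairwise (a b c d : Nat) :
    (List.replicate a "Q1" ++ List.replicate b "Q2" ++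
     List.replicate c "Q3" ++ List.replicate d "Q4").Pairwise (fun x y : String => x ≤ y) := by
  repeat rw [List.pairwise_append]
  refine ⟨⟨⟨List.pairwise_replicate.mpr (by simp), List.pairwise_replicate.mpr (by simp), ?_⟩,
    List.pairwise_replicate.mpr (by simp), ?_⟩, List.pairwise_replicate.mpr (by simp), ?_⟩
  · intro x hx y hy
    rw [List.eq_of_mem_replicate hx, List.eq_of_mem_replicate hy]; exact qle12
  · intro x hx y hy
    rw [List.eq_of_mem_replicate hy]
    rcases List.mem_append.mp hx with hx | hx
    · rw [List.eq_of_mem_replicate hx]; exact qle13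
    · rw [List.eq_of_mem_replicate hx]; exact qle23
  · intro x hx y hy
    rw [List.eq_of_mem_replicate hy]
    rcases List.mem_append.mp hx with hx | hx
    · rcases List.mem_append.mp hx with hx | hx
      · rw [List.eq_of_mem_replicate hx]; exact qle14
      · rw [List.eq_of_mem_replicate hx]; exact qle24
    · rw [List.eq_of_mem_replicate hx]; exact qle34

lemma sorted_filtered_eq_blocks (l : List (Option String)) :
    PySem.List.sorted (l.filterMap gdqKeep) (fun x => x) false =
      List.replicate (l.count (some "Q1")) "Q1" ++ List.replicate (l.count (some "Q2")) "Q2" ++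
      List.replicate (l.count (some "Q3")) "Q3" ++ List.replicate (l.count (some "Q4")) "Q4" := by
  apply PySem.List.sorted_id_eq_of_perm_of_pairwise
  · rw [List.perm_iff_count]
    intro x
    by_cases hx : x = "Q1" ∨ x = "Q2" ∨ x = "Q3" ∨ x = "Q4"
    · rw [count_filterMap_keep x hx]
      rcases hx with rfl | rfl | rfl | rfl <;>
        simp [List.count_append, List.count_replicate]
    · have h0 : (l.filterMap gdqKeep).count x = 0 := by
        rw [List.count_eq_zero]
        intro hmem
        exact hx (mem_filterMap_keep l x hmem)
      rw [not_or, not_or, not_or] at hx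
      obtain ⟨h1', h2', h3', h4'⟩ := hx
      simp [List.count_append, List.count_replicate, h0,
        Ne.symm h1', Ne.symm h2', Ne.symm h3', Ne.symm h4']
  · exact blocks_pairwise _ _ _ _

lemma fold_replicate (k : Nat) (x : String) (best : Option String) (bl cl : Int) :
    (List.replicate k x).foldl gdqStep (best, bl, some x, cl) = (best, bl, some x, cl + k) := by
  induction k generalizing cl with
  | zero => simp
  | succ n ih =>
    rw [List.replicate_succ, List.foldl_cons,
      show gdqStep (best, bl, some x, cl) x = (best, bl, some x, cl + 1) from by simp [gdqStep],
      ih]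
    have h : cl + 1 + (n : Int) = cl + ((n : Int) + 1) := by ring
    rw [h, Nat.cast_succ]

lemma fold_blocks (L : List (String × Nat)) (best cur : Option String) (bl cl : Int)
    (hbl : 0 ≤ bl) (hcl : 0 ≤ cl)
    (hcur : ∀ p ∈ L, some p.1 ≠ cur) (hnd : (L.map Prod.fst).Nodup) :
    gdqFin ((L.flatMap (fun p => List.replicate p.2 p.1)).foldl gdqStep (best, bl, cur, cl)) =
    (L.foldl gdqBest (if cl > bl then (cur, cl) else (best, bl))).1 := by
  induction L generalizing best cur bl cl with
  | nil =>
    simp only [List.flatMap_nil, List.foldl_nil, gdqFin]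
    split_ifs <;> rfl
  | cons p t ih =>
    obtain ⟨y, k⟩ := p
    rw [List.flatMap_cons, List.foldl_append, List.foldl_cons]
    have hnd' : (t.map Prod.fst).Nodup := (List.nodup_cons.mp hnd).2
    have hy_not : y ∉ t.map Prod.fst := (List.nodup_cons.mp hnd).1
    have hcur' : ∀ q ∈ t, some q.1 ≠ some y := by
      intro q hq h
      exact hy_not (by
        have hq1 : q.1 = y := by injection h
        rw [← hq1]; exact List.mem_map_of_mem hq)
    cases k with
    | zero =>
      simp only [List.replicate_zero, List.foldl_nil]
      rw [ih best cur bl cl hbl hcl (fun q hq => hcur q (List.mem_cons_of_mem _ hq)) hnd']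
      congr 2
      simp only [gdqBest, Nat.cast_zero]
      split_ifs <;> first | rfl | (exfalso; omega)
    | succ m =>
      rw [List.replicate_succ, List.foldl_cons]
      have hne : some y ≠ cur := hcur (y, m + 1) (List.mem_cons_self)
      have hm : (1 : Int) + (m : Int) = ((m + 1 : Nat) : Int) := by push_cast; ring
      by_cases hc : cl > bl
      · rw [show gdqStep (best, bl, cur, cl) y = (cur, cl, some y, 1) from by
          simp only [gdqStep]; rw [if_neg hne, if_pos hc]]
        rw [fold_replicate, hm, ih cur (some y) cl ((m + 1 : Nat) : Int) hcl (by positivity) hcur' hnd']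
        rw [if_pos hc]; simp only [gdqBest]
      · rw [show gdqStep (best, bl, cur, cl) y = (best, bl, some y, 1) from by
          simp only [gdqStep]; rw [if_neg hne, if_neg hc]]
        rw [fold_replicate, hm, ih best (some y) bl ((m + 1 : Nat) : Int) hbl (by positivity) hcur' hnd']
        rw [if_neg hc]; simp only [gdqBest]

lemma foldA_counts (l : List (Option String)) (a b c d : Int) :
    l.foldl
      (fun c q => match q with
        | some s => if c.contains s then c.modify s 0 (· + 1) else c
        | none => c)
      (PySem.Dict.mk [("Q1", a), ("Q2", b), ("Q3", c), ("Q4", d)]) =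
    PySem.Dict.mk [("Q1", a + l.count (some "Q1")), ("Q2", b + l.count (some "Q2")),
                   ("Q3", c + l.count (some "Q3")), ("Q4", d + l.count (some "Q4"))] := by
  induction l generalizing a b c d with
  | nil => simp
  | cons q t ih =>
    cases q with
    | none =>
      simp only [List.foldl_cons, List.count_cons, ih]
      simp
    | some s =>
      by_cases h1 : s = "Q1"
      · subst h1
        have : (PySem.Dict.mk [("Q1", a), ("Q2", b), ("Q3", c), ("Q4", d)]).modify "Q1" 0 (· + 1)
            = PySem.Dict.mk [("Q1", a + 1), ("Q2", b), ("Q3", c), ("Q4", d)] := by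
          simp [PySem.Dict.modify, PySem.Dict.insert, PySem.Dict.getD, PySem.Dict.get?]
        simp only [List.foldl_cons, List.count_cons]
        simp [this, ih]
        omega
      · by_cases h2 : s = "Q2"
        · subst h2
          have : (PySem.Dict.mk [("Q1", a), ("Q2", b), ("Q3", c), ("Q4", d)]).modify "Q2" 0 (· + 1)
              = PySem.Dict.mk [("Q1", a), ("Q2", b + 1), ("Q3", c), ("Q4", d)] := by
            simp [PySem.Dict.modify, PySem.Dict.insert, PySem.Dict.getD, PySem.Dict.get?]
          simp only [List.foldl_cons, List.count_cons]
          simp [this, ih]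
          omega
        · by_cases h3 : s = "Q3"
          · subst h3
            have : (PySem.Dict.mk [("Q1", a), ("Q2", b), ("Q3", c), ("Q4", d)]).modify "Q3" 0 (· + 1)
                = PySem.Dict.mk [("Q1", a), ("Q2", b), ("Q3", c + 1), ("Q4", d)] := by
              simp [PySem.Dict.modify, PySem.Dict.insert, PySem.Dict.getD, PySem.Dict.get?]
            simp only [List.foldl_cons, List.count_cons]
            simp [this, ih]
            omega
          · by_cases h4 : s = "Q4"
            · subst h4
              have : (PySem.Dict.mk [("Q1", a), ("Q2", b), ("Q3", c), ("Q4", d)]).modify "Q4" 0 (· + 1)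
                  = PySem.Dict.mk [("Q1", a), ("Q2", b), ("Q3", c), ("Q4", d + 1)] := by
                simp [PySem.Dict.modify, PySem.Dict.insert, PySem.Dict.getD, PySem.Dict.get?]
              simp only [List.foldl_cons, List.count_cons]
              simp [this, ih]
              omega
            · simp only [List.foldl_cons, List.count_cons]
              have hc : (PySem.Dict.mk [("Q1", a), ("Q2", b), ("Q3", c), ("Q4", d)]).contains s = false := by
                simp only [PySem.Dict.contains_mk, List.any_cons, List.any_nil,
                  Bool.or_eq_false_iff, beq_eq_false_iff_ne, ne_eq]
                exact ⟨fun h => h1 h.symm, fun h => h2 h.symm, fun h => h3 h.symm,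
                  fun h => h4 h.symm, trivial⟩
              simp [hc, ih, h1, h2, h3, h4]

set_option maxHeartbeats 1000000 in
lemma final_eq (a b c d : Nat) :
    (match PySem.List.max? [(a : Int), b, c, d] (fun x => x) with
     | none => (none : Option String)
     | some m =>
       if m = 0 then none
       else ["Q1", "Q2", "Q3", "Q4"].find? (fun q =>
         (PySem.Dict.mk [("Q1", (a:Int)), ("Q2", b), ("Q3", c), ("Q4", d)]).getD q 0 == m)) =
    ([("Q1", a), ("Q2", b), ("Q3", c), ("Q4", d)].foldl gdqBest
      ((none : Option String), (0 : Int))).1 := by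
  rw [show PySem.List.max? [(a : Int), b, c, d] (fun x => x)
      = some (max (max (max (a:Int) b) c) d) from by
    rw [PySem.List.max?_id_cons]; simp [List.foldl]]
  simp only [List.foldl, List.find?, PySem.Dict.getD, PySem.Dict.get?, gdqBest,
    String.reduceBEq, Option.map_some, Option.getD_some]
  norm_num
  by_cases h1 : (b:Int) ≤ a ∧ (c:Int) ≤ a ∧ (d:Int) ≤ a
  · obtain ⟨hb, hc, hd⟩ := h1
    rw [show max (a:Int) (max (b:Int) (max (c:Int) d)) = a from by
      simp only [Int.max_def]; split_ifs <;> omega]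
    by_cases ha0 : a = 0
    · have hb0 : b = 0 := by omega
      have hc0 : c = 0 := by omega
      have hd0 : d = 0 := by omega
      subst ha0 hb0 hc0 hd0
      norm_num
    · simp [ha0, Nat.pos_of_ne_zero ha0,
        show ¬((a:Int) < b) from by omega, show ¬((a:Int) < c) from by omega,
        show ¬((a:Int) < d) from by omega]
  · rw [not_and_or, not_and_or] at h1
    push Not at h1
    by_cases h2 : (c:Int) ≤ b ∧ (d:Int) ≤ b
    · obtain ⟨hc, hd⟩ := h2
      have hab : (a:Int) < b := by rcases h1 with h | h | h <;> omega
      rw [show max (a:Int) (max (b:Int) (max (c:Int) d)) = b from by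
        simp only [Int.max_def]; split_ifs <;> omega]
      simp [show ((a:Int) == (b:Int)) = false from beq_eq_false_iff_ne.mpr (by omega)]
      split_ifs <;> first | rfl | omega
    · rw [not_and_or] at h2
      push Not at h2
      by_cases h3 : (d:Int) ≤ c
      · have hbc : (b:Int) < c := by rcases h2 with h | h <;> omega
        have hac : (a:Int) < c := by rcases h1 with h | h | h <;> omega
        rw [show max (a:Int) (max (b:Int) (max (c:Int) d)) = c from by
          simp only [Int.max_def]; split_ifs <;> omega]
        simp [show ((a:Int) == (c:Int)) = false from beq_eq_false_iff_ne.mpr (by omega),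
          show ((b:Int) == (c:Int)) = false from beq_eq_false_iff_ne.mpr (by omega)]
        split_ifs <;> first | rfl | omega
      · push Not at h3
        have hcd : (c:Int) < d := by exact_mod_cast h3
        have hbd : (b:Int) < d := by rcases h2 with h | h <;> omega
        have had : (a:Int) < d := by rcases h1 with h | h | h <;> omega
        rw [show max (a:Int) (max (b:Int) (max (c:Int) d)) = d from by
          simp only [Int.max_def]; split_ifs <;> omega]
        simp [show ((a:Int) == (d:Int)) = false from beq_eq_false_iff_ne.mpr (by omega),
          show ((b:Int) == (d:Int)) = false from beq_eq_false_iff_ne.mpr (by omega),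
          show ((c:Int) == (d:Int)) = false from beq_eq_false_iff_ne.mpr (by omega)]
        split_ifs <;> first | rfl | omega

-- ===== VERDICT (by name: the statement is the Claim_ definition above) =====
theorem get_dominant_quadrant_spec : Claim_equal_get_dominant_quadrant := by
  intro quadrants _
  show get_dominant_quadrant quadrants = get_dominant_quadrant_alt quadrants
  unfold get_dominant_quadrant get_dominant_quadrant_alt
  rw [show (PySem.Dict.ofList [("Q1", (0:Int)), ("Q2", 0), ("Q3", 0), ("Q4", 0)])
      = PySem.Dict.mk [("Q1", (0:Int)), ("Q2", 0), ("Q3", 0), ("Q4", 0)] from rfl,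
    foldA_counts]
  rw [show (fun q : Option String => match q with
      | some s => if s = "Q1" ∨ s = "Q2" ∨ s = "Q3" ∨ s = "Q4" then some s else none
      | none => none) = gdqKeep from rfl,
    sorted_filtered_eq_blocks]
  rw [show List.replicate (quadrants.count (some "Q1")) "Q1" ++
        List.replicate (quadrants.count (some "Q2")) "Q2" ++
        List.replicate (quadrants.count (some "Q3")) "Q3" ++
        List.replicate (quadrants.count (some "Q4")) "Q4"
      = ([("Q1", quadrants.count (some "Q1")), ("Q2", quadrants.count (some "Q2")),
          ("Q3", quadrants.count (some "Q3")), ("Q4", quadrants.count (some "Q4"))]).flatMap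
          (fun p => List.replicate p.2 p.1) from by
    simp [List.flatMap_cons]]
  have hfb := fold_blocks
    [("Q1", quadrants.count (some "Q1")), ("Q2", quadrants.count (some "Q2")),
     ("Q3", quadrants.count (some "Q3")), ("Q4", quadrants.count (some "Q4"))]
    none none 0 0 le_rfl le_rfl (by intro p _; simp) (by simp)
  rw [if_neg (by omega)] at hfb
  simp only [zero_add, PySem.Dict.values_mk]
  exact (final_eq (quadrants.count (some "Q1")) (quadrants.count (some "Q2"))
    (quadrants.count (some "Q3")) (quadrants.count (some "Q4"))).trans hfb.symm
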